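-- pv_equiv track=rewrite | github.com/VitaliyTomchyk/python-project-50 | gendiff/dictionaries/additional_tools.py | generator_of_diff_dict_diff_key
-- ===== SOURCE A (Python) =====
-- def generator_of_diff_dict_diff_key(first_dict, second_dict):
--     unique_pairs = {}
--
--     unique_keys = set(first_dict) - set(second_dict)
--     for key in unique_keys:
--         unique_pairs[key] = [first_dict[key], None]
--
--     unique_keys = set(second_dict) - set(first_dict)
--     for key in unique_keys:
--         unique_pairs[key] = [None, second_dict[key]]
--
--     return unique_pairs
-- ===== SOURCE B (Python) =====
-- def generator_of_diff_dict_diff_key(first_dict, second_dict):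
--     slots = {}
--     for key, value in first_dict.items():
--         slots.setdefault(key, []).append([value, None])
--     for key, value in second_dict.items():
--         slots.setdefault(key, []).append([None, value])
--     return {key: entries[0] for key, entries in slots.items() if len(entries) == 1}
-- ===== Notes on version B (the rewrite author's own statement) =====
-- stated objective: alternative
-- what changed: Replaces the two set-difference-then-index passes with a group-by join: both dicts' rows are appended into one shared slots multimap (no membership test against the other dict anywhere), and the result keeps exactly the keys whose group is a singleton.
import Mathlib
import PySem

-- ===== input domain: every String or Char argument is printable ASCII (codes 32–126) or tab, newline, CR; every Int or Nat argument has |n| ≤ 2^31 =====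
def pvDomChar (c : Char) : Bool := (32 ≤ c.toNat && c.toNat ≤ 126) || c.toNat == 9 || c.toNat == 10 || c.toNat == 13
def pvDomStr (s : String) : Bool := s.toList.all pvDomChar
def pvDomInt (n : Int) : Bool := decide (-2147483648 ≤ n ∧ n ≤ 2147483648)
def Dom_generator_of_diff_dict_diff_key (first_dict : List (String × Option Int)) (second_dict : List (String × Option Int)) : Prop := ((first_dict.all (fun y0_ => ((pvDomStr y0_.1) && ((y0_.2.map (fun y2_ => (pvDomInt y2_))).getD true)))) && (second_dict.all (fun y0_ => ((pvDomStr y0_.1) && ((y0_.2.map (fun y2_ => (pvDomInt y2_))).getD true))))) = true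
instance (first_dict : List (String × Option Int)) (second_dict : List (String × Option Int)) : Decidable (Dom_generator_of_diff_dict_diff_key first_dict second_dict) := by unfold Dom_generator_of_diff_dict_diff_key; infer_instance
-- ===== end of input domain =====

-- B replaces A's two set-difference-then-index passes with a group-by join: both dicts' rows are
-- appended into one shared slots multimap and the result keeps the keys whose group is a singleton
-- (objective: alternative). Python's hash-based set iteration order is not modelled: A's port
-- iterates the difference sets in first-occurrence order (outputs are compared as dicts).

-- ===== PORT A =====
-- first_dict[key] is ported as getD (the key is always a present key of the dict when looked up).
def generator_of_diff_dict_diff_key (first_dict : List (String × Option Int)) (second_dict : List (String × Option Int)) : List (String × List (Option Int)) :=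
  let fd : PySem.Dict String (Option Int) := PySem.Dict.mk first_dict
  let sd : PySem.Dict String (Option Int) := PySem.Dict.mk second_dict
  -- unique_keys = set(first_dict) - set(second_dict); for key in unique_keys: …
  let uk1 : PySem.Set String := PySem.Set.diff (PySem.Set.ofList fd.keys) (PySem.Set.ofList sd.keys)
  let up1 : PySem.Dict String (List (Option Int)) :=
    uk1.foldl (fun acc k => acc.insert k [fd.getD k none, none]) PySem.Dict.empty
  -- unique_keys = set(second_dict) - set(first_dict); for key in unique_keys: …
  let uk2 : PySem.Set String := PySem.Set.diff (PySem.Set.ofList sd.keys) (PySem.Set.ofList fd.keys)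
  let up2 : PySem.Dict String (List (Option Int)) :=
    uk2.foldl (fun acc k => acc.insert k [none, sd.getD k none]) up1
  up2.items

-- ===== PORT B =====
-- slots.setdefault(key, []).append(x) is ported as modify key [] (· ++ [x]); entries[0] is taken
-- under the len(entries) == 1 guard, so it is ported as headD [].
def generator_of_diff_dict_diff_key_alt (first_dict : List (String × Option Int)) (second_dict : List (String × Option Int)) : List (String × List (Option Int)) :=
  let slots1 : PySem.Dict String (List (List (Option Int))) :=
    first_dict.foldl (fun d p => d.modify p.1 [] (· ++ [[p.2, none]])) PySem.Dict.empty
  let slots2 : PySem.Dict String (List (List (Option Int))) :=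
    second_dict.foldl (fun d p => d.modify p.1 [] (· ++ [[none, p.2]])) slots1
  -- {key: entries[0] for key, entries in slots.items() if len(entries) == 1}
  (slots2.items.foldl
    (fun acc e => if e.2.length == 1 then acc.insert e.1 (e.2.headD []) else acc)
    PySem.Dict.empty).items

-- ===== PRECONDITION & SPEC =====
-- Both arguments are Python dicts, whose keys are necessarily distinct; Pre_ states exactly that
-- (an association list with a duplicated key does not represent any input the Python function receives).
def Pre_generator_of_diff_dict_diff_key (first_dict : List (String × Option Int)) (second_dict : List (String × Option Int)) : Prop :=
  (first_dict.map Prod.fst).Nodup ∧ (second_dict.map Prod.fst).Nodup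
instance (first_dict : List (String × Option Int)) (second_dict : List (String × Option Int)) : Decidable (Pre_generator_of_diff_dict_diff_key first_dict second_dict) := by unfold Pre_generator_of_diff_dict_diff_key; infer_instance
def pvWitness_generator_of_diff_dict_diff_key : (List (String × Option Int)) × (List (String × Option Int)) :=
  ([("a", some 1), ("b", none)], [("b", some 2), ("c", some 3)])

def Spec_generator_of_diff_dict_diff_key (first_dict : List (String × Option Int)) (second_dict : List (String × Option Int)) (out : List (String × List (Option Int))) : Prop := out = generator_of_diff_dict_diff_key_alt first_dict second_dict
instance (first_dict : List (String × Option Int)) (second_dict : List (String × Option Int)) (out : List (String × List (Option Int))) : Decidable (Spec_generator_of_diff_dict_diff_key first_dict second_dict out) := by unfold Spec_generator_of_diff_dict_diff_key; infer_instance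

-- ===== CLAIM (what is proved, stated in full; the proofs are below) =====
def Claim_equal_generator_of_diff_dict_diff_key : Prop := ∀ (first_dict : List (String × Option Int)) (second_dict : List (String × Option Int)), Dom_generator_of_diff_dict_diff_key first_dict second_dict → Pre_generator_of_diff_dict_diff_key first_dict second_dict → Spec_generator_of_diff_dict_diff_key first_dict second_dict (generator_of_diff_dict_diff_key first_dict second_dict)

-- ===== LEMMAS AND PROOFS =====

-- the canonical value both programs compute: first-only rows then second-only rows
def pvC (f s : List (String × Option Int)) : List (String × List (Option Int)) :=
  (f.filter (fun kv => !(PySem.Dict.mk s).contains kv.1)).map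
      (fun kv => (kv.1, ([kv.2, none] : List (Option Int))))
    ++ (s.filter (fun kv => !(PySem.Dict.mk f).contains kv.1)).map
      (fun kv => (kv.1, ([none, kv.2] : List (Option Int))))

-- set(xs) is xs itself when xs has no duplicates (generalized over the accumulator).
theorem pv_foldl_add_of_nodup {α : Type} [BEq α] [LawfulBEq α] (xs acc : List α)
    (hnd : xs.Nodup) (hfresh : ∀ x ∈ xs, acc.contains x = false) :
    xs.foldl PySem.Set.add acc = acc ++ xs := by
  induction xs generalizing acc with
  | nil => simp
  | cons x t ih =>
      simp only [List.foldl_cons, PySem.Set.add, PySem.Set.contains]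
      rw [if_neg (by rw [hfresh x (by simp)]; simp)]
      rw [ih (acc ++ [x]) hnd.of_cons]
      · simp
      · intro y hy
        have ha : acc.contains y = false := hfresh y (List.mem_cons_of_mem _ hy)
        have hb : y ≠ x := fun h => (List.nodup_cons.mp hnd).1 (h ▸ hy)
        have ha' : y ∉ acc := by simpa using ha
        simp [ha', hb]

theorem pv_ofList_of_nodup {α : Type} [BEq α] [LawfulBEq α] (xs : List α) (hnd : xs.Nodup) :
    PySem.Set.ofList xs = xs := by
  have := pv_foldl_add_of_nodup xs [] hnd (by intro x _; rfl)
  simpa [PySem.Set.ofList, PySem.Set.empty] using this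

-- id-key specialisation of items_foldl_insert_fresh
theorem pv_foldl_insert_items {ν : Type} (l : List String) (v : String → ν)
    (d : PySem.Dict String ν) (hfresh : ∀ k ∈ l, d.contains k = false) (hnd : l.Nodup) :
    (l.foldl (fun acc k => acc.insert k (v k)) d).items = d.items ++ l.map (fun k => (k, v k)) := by
  have := PySem.Dict.items_foldl_insert_fresh l (fun k => k) v d hfresh (by simpa using hnd)
  simpa using this

-- the set-membership test and the dict-membership test agree
theorem pv_contains_eq (l : List (String × Option Int)) (k : String) :
    PySem.Set.contains (l.map Prod.fst) k = (PySem.Dict.mk l).contains k := by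
  rw [Bool.eq_iff_iff]
  simp only [PySem.Set.contains, PySem.Dict.contains_mk, List.any_eq_true, List.elem_iff,
    List.mem_map, beq_iff_eq]

theorem pv_not_mem_of_contains_false (l : List (String × Option Int)) (k : String)
    (h : (PySem.Dict.mk l).contains k = false) : k ∉ l.map Prod.fst := by
  intro hk
  have := (PySem.Dict.contains_iff_mem_keys (PySem.Dict.mk l) k).mpr hk
  rw [h] at this; cases this

theorem pv_contains_false_of_not_mem {ν : Type} (d : PySem.Dict String ν) (k : String)
    (h : k ∉ d.keys) : d.contains k = false := by
  cases hb : d.contains k with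
  | false => rfl
  | true => exact absurd ((PySem.Dict.contains_iff_mem_keys d k).mp hb) h

-- A, first loop: inserting the keys of first_dict missing from second_dict into the empty dict
theorem pv_A1 (f s : List (String × Option Int)) (h1 : (f.map Prod.fst).Nodup) :
    (List.foldl (fun acc k => acc.insert k [(PySem.Dict.mk f).getD k none, none]) PySem.Dict.empty
        ((f.map Prod.fst).filter (fun x => !(PySem.Dict.mk s).contains x))).items
      = (f.filter (fun kv => !(PySem.Dict.mk s).contains kv.1)).map
          (fun kv => (kv.1, ([kv.2, none] : List (Option Int)))) := by
  rw [pv_foldl_insert_items _ _ _ (fun k _ => by simp) (h1.filter _)]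
  rw [List.filter_map, List.map_map]
  rw [show (PySem.Dict.empty : PySem.Dict String (List (Option Int))).items = [] from rfl,
    List.nil_append]
  apply List.map_congr_left
  intro kv hkv
  have hm : (kv.1, kv.2) ∈ f := by
    have := List.mem_of_mem_filter hkv; simpa using this
  simp [Function.comp, PySem.Dict.getD_of_mem_items (PySem.Dict.mk f) hm h1 none]

-- A, second loop: inserting the keys of second_dict missing from first_dict into a dict
-- whose keys all come from first_dict
theorem pv_A2 (f s : List (String × Option Int)) (d : PySem.Dict String (List (Option Int)))
    (hd : ∀ k ∈ d.keys, k ∈ f.map Prod.fst) (h2 : (s.map Prod.fst).Nodup) :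
    (List.foldl (fun acc k => acc.insert k [none, (PySem.Dict.mk s).getD k none]) d
        ((s.map Prod.fst).filter (fun x => !(PySem.Dict.mk f).contains x))).items
      = d.items ++ (s.filter (fun kv => !(PySem.Dict.mk f).contains kv.1)).map
          (fun kv => (kv.1, ([none, kv.2] : List (Option Int)))) := by
  rw [pv_foldl_insert_items _ _ _ ?fresh (h2.filter _)]
  case fresh =>
    intro k hk
    have hpk : (PySem.Dict.mk f).contains k = false := by
      have := (List.mem_filter.mp hk).2; simpa using this
    exact pv_contains_false_of_not_mem d k
      (fun hmem => pv_not_mem_of_contains_false f k hpk (hd k hmem))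
  rw [List.filter_map, List.map_map]
  congr 1
  apply List.map_congr_left
  intro kv hkv
  have hm : (kv.1, kv.2) ∈ s := by
    have := List.mem_of_mem_filter hkv; simpa using this
  simp [Function.comp, PySem.Dict.getD_of_mem_items (PySem.Dict.mk s) hm h2 none]

-- A computes the canonical value
theorem pv_A_eq (first_dict second_dict : List (String × Option Int))
    (h1 : (first_dict.map Prod.fst).Nodup) (h2 : (second_dict.map Prod.fst).Nodup) :
    generator_of_diff_dict_diff_key first_dict second_dict = pvC first_dict second_dict := by
  unfold generator_of_diff_dict_diff_key pvC
  dsimp only [PySem.Dict.keys, PySem.Set.diff]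
  rw [pv_ofList_of_nodup _ h1, pv_ofList_of_nodup _ h2]
  simp only [pv_contains_eq]
  have hdA : ∀ k ∈ (List.foldl (fun acc k => acc.insert k
      [(PySem.Dict.mk first_dict).getD k none, none]) PySem.Dict.empty
      ((first_dict.map Prod.fst).filter
        (fun x => !(PySem.Dict.mk second_dict).contains x))).keys,
      k ∈ first_dict.map Prod.fst := by
    intro k hk
    simp only [PySem.Dict.keys, pv_A1 first_dict second_dict h1, List.map_map,
      List.mem_map] at hk
    rcases hk with ⟨kv, hkv, rfl⟩
    exact List.mem_map.mpr ⟨kv, List.mem_of_mem_filter hkv, rfl⟩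
  rw [pv_A2 first_dict second_dict _ hdA h2, pv_A1 first_dict second_dict h1]

-- B, first loop: grouping fresh distinct keys into an accumulator appends singleton groups
theorem pv_grp_fresh (l : List (String × Option Int))
    (d : PySem.Dict String (List (List (Option Int))))
    (hfresh : ∀ p ∈ l, d.contains p.1 = false) (hnd : (l.map Prod.fst).Nodup) :
    (l.foldl (fun d p => d.modify p.1 [] (· ++ [[p.2, none]])) d).items
      = d.items ++ l.map (fun p => (p.1, ([[p.2, none]] : List (List (Option Int))))) := by
  induction l generalizing d with
  | nil => simp
  | cons p t ih =>
      have hnd' : (p.1 :: t.map Prod.fst).Nodup := by simpa using hnd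
      have hpt : p.1 ∉ t.map Prod.fst := (List.nodup_cons.mp hnd').1
      have hndt : (t.map Prod.fst).Nodup := (List.nodup_cons.mp hnd').2
      have hstep : d.modify p.1 [] (· ++ [[p.2, none]]) = d.insert p.1 [[p.2, none]] := by
        unfold PySem.Dict.modify
        rw [PySem.Dict.getD_of_not_contains d _ (hfresh p (by simp))]
        rfl
      simp only [List.foldl_cons]
      rw [hstep]
      rw [ih _ ?fresh hndt]
      · rw [PySem.Dict.items_insert_of_not_contains d _ (hfresh p (by simp))]
        simp
      case fresh =>
        intro q hq
        have hne : (q.1 == p.1) = false := by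
          simp only [beq_eq_false_iff_ne, ne_eq]
          intro h; exact hpt (h ▸ List.mem_map.mpr ⟨q, hq, rfl⟩)
        rw [PySem.Dict.contains_insert, hne]
        simp [hfresh q (List.mem_cons_of_mem _ hq)]

-- how the second grouping loop rewrites each existing entry
def pvF (s : List (String × Option Int)) (e : String × List (List (Option Int))) :
    String × List (List (Option Int)) :=
  match (PySem.Dict.mk s).get? e.1 with
  | some v => (e.1, e.2 ++ [[none, v]])
  | none => e

theorem pvF_fst (s : List (String × Option Int)) (e : String × List (List (Option Int))) :
    (pvF s e).1 = e.1 := by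
  unfold pvF
  cases (PySem.Dict.mk s).get? e.1 <;> rfl

theorem pvF_nil (e : String × List (List (Option Int))) : pvF [] e = e := by
  unfold pvF
  have h : (PySem.Dict.mk ([] : List (String × Option Int))).get? e.1 = none := rfl
  rw [h]

-- B, second loop: grouping over an arbitrary accumulator with distinct keys
theorem pv_grp_second (s : List (String × Option Int)) :
    ∀ (d : PySem.Dict String (List (List (Option Int)))), d.keys.Nodup →
    (s.map Prod.fst).Nodup →
    (s.foldl (fun d p => d.modify p.1 [] (· ++ [[none, p.2]])) d).items
      = d.items.map (pvF s)
        ++ (s.filter (fun p => !d.contains p.1)).map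
            (fun p => (p.1, ([[none, p.2]] : List (List (Option Int))))) := by
  induction s with
  | nil =>
      intro d _ _
      have hid : d.items.map (pvF []) = d.items.map id :=
        List.map_congr_left (fun e _ => pvF_nil e)
      simp [hid]
  | cons p t ih =>
      obtain ⟨k0, v0⟩ := p
      intro d hndd hnds
      have hnd' : (k0 :: t.map Prod.fst).Nodup := by simpa using hnds
      have hpt : k0 ∉ t.map Prod.fst := (List.nodup_cons.mp hnd').1
      have hndt : (t.map Prod.fst).Nodup := (List.nodup_cons.mp hnd').2
      have hget_t : (PySem.Dict.mk t).get? k0 = none := by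
        rw [PySem.Dict.get?_eq_none_iff_not_mem_keys]
        simpa [PySem.Dict.keys] using hpt
      simp only [List.foldl_cons]
      rw [show (d.modify k0 [] (· ++ [[none, v0]]))
            = d.insert k0 (d.getD k0 [] ++ [[none, v0]]) from rfl]
      by_cases hc : d.contains k0 = true
      · -- key already grouped: its entry is extended in place
        rw [ih _ (by rw [PySem.Dict.keys_insert_of_contains d _ hc]; exact hndd) hndt]
        rw [PySem.Dict.items_insert_of_contains d _ hc]
        rw [List.map_map]
        have hmap : ∀ q ∈ d.items,
            (pvF t ∘ fun q => if (q.1 == k0) = true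
                then (k0, d.getD k0 [] ++ [[none, v0]]) else q) q
              = pvF ((k0, v0) :: t) q := by
          intro q hq
          by_cases hqe : q.1 = k0
          · have hgetd : d.getD k0 [] = q.2 := by
              have hmem : (q.1, q.2) ∈ d.items := hq
              rw [← hqe]
              exact PySem.Dict.getD_of_mem_items d hmem hndd []
            have hbe : (q.1 == k0) = true := by simpa using hqe
            simp only [Function.comp, hbe, if_pos]
            unfold pvF
            rw [show (PySem.Dict.mk ((k0, v0) :: t)).get? q.1 = some v0 by
              rw [PySem.Dict.get?_mk_cons]; simp [hqe]]
            dsimp only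
            rw [show (PySem.Dict.mk t).get? k0 = none from hget_t]
            simp [hgetd, hqe]
          · have hbe : (q.1 == k0) = false := by simpa using hqe
            simp only [Function.comp, hbe, Bool.false_eq_true, if_neg, not_false_iff]
            unfold pvF
            rw [show (PySem.Dict.mk ((k0, v0) :: t)).get? q.1 = (PySem.Dict.mk t).get? q.1 by
              rw [PySem.Dict.get?_mk_cons]; simp [show (k0 == q.1) = false by
                simpa using fun h => hqe h.symm]]
        rw [List.map_congr_left hmap]
        have hfil : t.filter (fun q => !(d.insert k0 (d.getD k0 [] ++ [[none, v0]])).contains q.1)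
            = t.filter (fun q => !d.contains q.1) := by
          apply List.filter_congr
          intro q hq
          have hne : (q.1 == k0) = false := by
            simp only [beq_eq_false_iff_ne, ne_eq]
            intro h; exact hpt (h ▸ List.mem_map.mpr ⟨q, hq, rfl⟩)
          rw [PySem.Dict.contains_insert, hne]
          simp
        rw [hfil, List.filter_cons, if_neg (by simp [hc])]
      · -- new key: a fresh singleton group is appended
        have hc' : d.contains k0 = false := by simpa using hc
        rw [PySem.Dict.getD_of_not_contains d _ hc']
        simp only [List.nil_append]
        rw [ih _ ?ndk hndt]
        case ndk =>
          rw [PySem.Dict.keys_insert_of_not_contains d _ hc']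
          refine List.Nodup.append hndd (List.nodup_singleton _) ?_
          intro x hx hx'
          have hxk : x = k0 := by simpa using hx'
          subst hxk
          rw [(PySem.Dict.contains_iff_mem_keys d x).mpr hx] at hc'
          cases hc'
        rw [PySem.Dict.items_insert_of_not_contains d _ hc']
        rw [List.map_append]
        have hnew : (([(k0, [[none, v0]])] : List (String × List (List (Option Int)))).map (pvF t))
            = [(k0, ([[none, v0]] : List (List (Option Int))))] := by
          simp only [List.map_cons, List.map_nil]
          unfold pvF
          dsimp only
          rw [show (PySem.Dict.mk t).get? k0 = none from hget_t]
        have hmap : d.items.map (pvF t) = d.items.map (pvF ((k0, v0) :: t)) := by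
          apply List.map_congr_left
          intro q hq
          have hqe : (k0 == q.1) = false := by
            simp only [beq_eq_false_iff_ne, ne_eq]
            intro h
            have hmem : q.1 ∈ d.keys := by
              simp only [PySem.Dict.keys]
              exact List.mem_map.mpr ⟨q, hq, rfl⟩
            rw [h] at hc'
            rw [(PySem.Dict.contains_iff_mem_keys d q.1).mpr hmem] at hc'
            cases hc'
          unfold pvF
          rw [show (PySem.Dict.mk ((k0, v0) :: t)).get? q.1 = (PySem.Dict.mk t).get? q.1 by
            rw [PySem.Dict.get?_mk_cons]; simp [hqe]]
        have hfil : t.filter (fun q => !(d.insert k0 [[none, v0]]).contains q.1)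
            = t.filter (fun q => !d.contains q.1) := by
          apply List.filter_congr
          intro q hq
          have hne : (q.1 == k0) = false := by
            simp only [beq_eq_false_iff_ne, ne_eq]
            intro h; exact hpt (h ▸ List.mem_map.mpr ⟨q, hq, rfl⟩)
          rw [PySem.Dict.contains_insert, hne]
          simp
        rw [hfil, hmap, hnew, List.filter_cons, if_pos (by simp [hc'])]
        simp

-- the dict-comprehension loop: a guarded insert over fresh distinct keys keeps the filtered rows
theorem pv_foldl_guard_insert {α ν : Type} (c : String × α → Bool) (v : String × α → ν)
    (l : List (String × α)) (d : PySem.Dict String ν)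
    (hnd : (l.map Prod.fst).Nodup)
    (hfresh : ∀ kv ∈ l, c kv = true → d.contains kv.1 = false) :
    (l.foldl (fun acc kv => if c kv then acc.insert kv.1 (v kv) else acc) d).items
      = d.items ++ (l.filter c).map (fun kv => (kv.1, v kv)) := by
  induction l generalizing d with
  | nil => simp
  | cons kv t ih =>
      have hndt : (t.map Prod.fst).Nodup := by
        simpa using (hnd.of_cons : (t.map Prod.fst).Nodup)
      simp only [List.foldl_cons, List.filter_cons]
      by_cases hc : c kv = true
      · rw [if_pos hc, ih _ hndt]
        · rw [PySem.Dict.items_insert_of_not_contains _ _ (hfresh kv (by simp) hc)]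
          simp [hc]
        · intro q hq hcq
          have hne : (q.1 == kv.1) = false := by
            simp only [beq_eq_false_iff_ne, ne_eq]
            intro h
            exact (List.nodup_cons.mp (by simpa using hnd : (kv.1 :: t.map Prod.fst).Nodup)).1
              (h ▸ List.mem_map.mpr ⟨q, hq, rfl⟩)
          rw [PySem.Dict.contains_insert, hne]
          simp [hfresh q (List.mem_cons_of_mem _ hq) hcq]
      · rw [if_neg hc, ih _ hndt (fun q hq hcq => hfresh q (List.mem_cons_of_mem _ hq) hcq)]
        simp [hc]

-- B computes the canonical value
theorem pv_B_eq (first_dict second_dict : List (String × Option Int))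
    (h1 : (first_dict.map Prod.fst).Nodup) (h2 : (second_dict.map Prod.fst).Nodup) :
    generator_of_diff_dict_diff_key_alt first_dict second_dict = pvC first_dict second_dict := by
  simp only [generator_of_diff_dict_diff_key_alt]
  have h1i : (first_dict.foldl (fun d p => d.modify p.1 [] (· ++ [[p.2, none]]))
      PySem.Dict.empty).items
      = first_dict.map (fun p => (p.1, ([[p.2, none]] : List (List (Option Int))))) := by
    rw [pv_grp_fresh _ _ (fun p _ => rfl) h1]; rfl
  have h1k : (first_dict.foldl (fun d p => d.modify p.1 [] (· ++ [[p.2, none]]))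
      PySem.Dict.empty).keys = first_dict.map Prod.fst := by
    simp only [PySem.Dict.keys, h1i, List.map_map]; rfl
  have h1c : ∀ q, (first_dict.foldl (fun d p => d.modify p.1 [] (· ++ [[p.2, none]]))
      PySem.Dict.empty).contains q = (PySem.Dict.mk first_dict).contains q := by
    intro q
    rw [PySem.Dict.contains_eq_decide_mem_keys, PySem.Dict.contains_eq_decide_mem_keys, h1k]
    rfl
  have h2i : (second_dict.foldl (fun d p => d.modify p.1 [] (· ++ [[none, p.2]]))
        (first_dict.foldl (fun d p => d.modify p.1 [] (· ++ [[p.2, none]]))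
          PySem.Dict.empty)).items
      = (first_dict.map (fun p => (p.1, ([[p.2, none]] : List (List (Option Int)))))).map
          (pvF second_dict)
        ++ (second_dict.filter (fun p => !(PySem.Dict.mk first_dict).contains p.1)).map
            (fun p => (p.1, ([[none, p.2]] : List (List (Option Int))))) := by
    rw [pv_grp_second second_dict _ (by rw [h1k]; exact h1) h2, h1i]
    congr 1
    congr 1
    exact List.filter_congr (fun q _ => by rw [h1c q.1])
  -- distinctness of the grouped keys
  have hkeys : (((first_dict.map (fun p => (p.1, ([[p.2, none]] : List (List (Option Int)))))).map
          (pvF second_dict)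
        ++ (second_dict.filter (fun p => !(PySem.Dict.mk first_dict).contains p.1)).map
            (fun p => (p.1, ([[none, p.2]] : List (List (Option Int)))))).map Prod.fst).Nodup := by
    have hfst : ((first_dict.map (fun p => (p.1, ([[p.2, none]] : List (List (Option Int)))))).map
          (pvF second_dict)
        ++ (second_dict.filter (fun p => !(PySem.Dict.mk first_dict).contains p.1)).map
            (fun p => (p.1, ([[none, p.2]] : List (List (Option Int)))))).map Prod.fst
        = first_dict.map Prod.fst
          ++ (second_dict.filter (fun p => !(PySem.Dict.mk first_dict).contains p.1)).map
              Prod.fst := by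
      rw [List.map_append]
      congr 1
      · rw [List.map_map, List.map_map]
        exact List.map_congr_left (fun p _ => by simp [Function.comp, pvF_fst])
      · rw [List.map_map]
        exact List.map_congr_left (fun q _ => rfl)
    rw [hfst]
    refine List.Nodup.append h1 ?_ ?_
    · exact List.Nodup.sublist
        (List.Sublist.map Prod.fst List.filter_sublist) h2
    · intro x hx hx'
      rcases List.mem_map.mp hx' with ⟨q, hq, rfl⟩
      have hqc : (PySem.Dict.mk first_dict).contains q.1 = false := by
        have := (List.mem_filter.mp hq).2; simpa using this
      exact pv_not_mem_of_contains_false first_dict q.1 hqc hx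
  rw [h2i, pv_foldl_guard_insert _ _ _ _ hkeys (fun kv _ _ => rfl)]
  rw [show (PySem.Dict.empty : PySem.Dict String (List (Option Int))).items = [] from rfl,
    List.nil_append]
  rw [List.filter_append, List.map_append]
  unfold pvC
  congr 1
  · -- first-only rows: exactly the groups of length 1 coming from first_dict
    rw [List.map_map, List.filter_map, List.map_map]
    have hcond : ∀ p : String × Option Int,
        ((fun e => e.2.length == 1) ∘ pvF second_dict ∘
          (fun p => (p.1, ([[p.2, none]] : List (List (Option Int)))))) p
          = !(PySem.Dict.mk second_dict).contains p.1 := by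
      intro p
      simp only [Function.comp]
      unfold pvF
      cases hg : (PySem.Dict.mk second_dict).get? p.1 with
      | some v =>
          have : (PySem.Dict.mk second_dict).contains p.1 = true := by
            rw [PySem.Dict.contains_eq_isSome_get?, hg]; rfl
          simp [this]
      | none =>
          have : (PySem.Dict.mk second_dict).contains p.1 = false := by
            rw [PySem.Dict.contains_eq_isSome_get?, hg]; rfl
          simp [this]
    rw [List.filter_congr (fun p _ => hcond p)]
    apply List.map_congr_left
    intro p hp
    have hpc : (PySem.Dict.mk second_dict).contains p.1 = false := by
      have := (List.mem_filter.mp hp).2; simpa using this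
    have hg : (PySem.Dict.mk second_dict).get? p.1 = none := by
      cases hg : (PySem.Dict.mk second_dict).get? p.1 with
      | none => rfl
      | some v =>
          rw [PySem.Dict.contains_eq_isSome_get?, hg] at hpc
          cases hpc
    simp only [Function.comp]
    unfold pvF
    rw [hg]
    rfl
  · -- second-only rows: their groups always have length 1
    rw [List.filter_map, List.map_map]
    have hall : List.filter
        ((fun e : String × List (List (Option Int)) => e.2.length == 1)
          ∘ fun p : String × Option Int => (p.1, [[none, p.2]]))
        (List.filter (fun p => !(PySem.Dict.mk first_dict).contains p.1) second_dict)
        = List.filter (fun p => !(PySem.Dict.mk first_dict).contains p.1) second_dict :=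
      List.filter_eq_self.mpr (fun q _ => rfl)
    rw [hall]
    exact List.map_congr_left (fun q _ => rfl)

-- ===== VERDICT (by name: the statement is the Claim_ definition above) =====
theorem generator_of_diff_dict_diff_key_spec : Claim_equal_generator_of_diff_dict_diff_key := by
  intro f s _ hpre
  unfold Spec_generator_of_diff_dict_diff_key
  rw [pv_A_eq f s hpre.1 hpre.2, pv_B_eq f s hpre.1 hpre.2]
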